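-- pv_equiv track=rewrite | github.com/YelamanKarassay/Assignment_drafts | main.py | exercise_17
-- ===== SOURCE A (Python) =====
-- def exercise_17(n):
--     a = 0
--     arr = []
--     while n > a:
--         b = 1
--         while n > b:
--             arr.append(n)
--             b *= 2
--         a += 2
--     return arr
-- ===== SOURCE B (Python) =====
-- def exercise_17(n):
--     if n <= 1:
--         return []
--     outer = (n + 1) // 2          # count of a = 0,2,4,... with a < n
--     inner = (n - 1).bit_length()  # count of b = 1,2,4,... with b < n
--     return [n] * (outer * inner)
-- ===== Notes on version B (the rewrite author's own statement) =====
-- stated objective: faster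
-- what changed: Replaces the nested append loops by two closed-form counts (outer iterations = (n+1)//2, inner iterations = (n-1).bit_length()) and a single list multiplication [n] * (outer*inner).
import Mathlib
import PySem

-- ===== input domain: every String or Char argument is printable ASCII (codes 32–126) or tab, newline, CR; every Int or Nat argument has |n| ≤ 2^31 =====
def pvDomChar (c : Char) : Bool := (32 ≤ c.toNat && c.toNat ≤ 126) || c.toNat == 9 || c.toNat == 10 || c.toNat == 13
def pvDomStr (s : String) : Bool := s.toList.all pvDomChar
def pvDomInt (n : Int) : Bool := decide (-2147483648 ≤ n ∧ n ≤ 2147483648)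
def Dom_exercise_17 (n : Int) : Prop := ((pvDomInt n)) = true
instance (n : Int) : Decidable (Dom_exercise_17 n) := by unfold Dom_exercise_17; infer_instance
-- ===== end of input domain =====

-- B replaces A's nested append loops with two closed-form counts and one list multiplication.

-- ===== PORT A =====
-- inner while loop: `while n > b: arr.append(n); b *= 2` (b starts at 1, so 1 ≤ b throughout)
def ex17innerA (n : Int) (b : Int) (hb : 1 ≤ b) (arr : List Int) : List Int :=
  if h : n > b then ex17innerA n (b * 2) (by omega) (arr ++ [n]) else arr
termination_by (n - b).toNat
decreasing_by omega

-- outer while loop: `while n > a: <inner loop with b=1>; a += 2`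
def ex17outerA (n : Int) (a : Int) (arr : List Int) : List Int :=
  if h : n > a then ex17outerA n (a + 2) (ex17innerA n 1 (by omega) arr) else arr
termination_by (n - a).toNat
decreasing_by omega

def exercise_17 (n : Int) : List Int := ex17outerA n 0 []

-- ===== PORT B =====
def exercise_17_alt (n : Int) : List Int :=
  if n ≤ 1 then []
  else
    let outer := PySem.Int.floordiv (n + 1) 2
    let inner : Int := (PySem.Int.bitLength (n - 1) : Int)
    List.replicate (outer * inner).toNat n

-- ===== PRECONDITION & SPEC =====
def Spec_exercise_17 (n : Int) (out : List Int) : Prop := out = exercise_17_alt n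
instance (n : Int) (out : List Int) : Decidable (Spec_exercise_17 n out) := by unfold Spec_exercise_17; infer_instance

-- ===== CLAIM (what is proved, stated in full; the proofs are below) =====
def Claim_equal_exercise_17 : Prop := ∀ (n : Int), Dom_exercise_17 n → Spec_exercise_17 n (exercise_17 n)

-- ===== LEMMAS AND PROOFS =====

-- number of inner iterations starting from b
def ex17icnt (n : Int) (b : Int) (hb : 1 ≤ b) : Nat :=
  if h : n > b then ex17icnt n (b * 2) (by omega) + 1 else 0
termination_by (n - b).toNat
decreasing_by omega

-- number of outer iterations starting from a
def ex17ocnt (n : Int) (a : Int) : Nat :=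
  if h : n > a then ex17ocnt n (a + 2) + 1 else 0
termination_by (n - a).toNat
decreasing_by omega

theorem ex17icnt_pos (n b : Int) (hb : 1 ≤ b) (h : n > b) :
    ex17icnt n b hb = ex17icnt n (b * 2) (by omega) + 1 := by
  rw [ex17icnt]; simp [h]

theorem ex17icnt_neg (n b : Int) (hb : 1 ≤ b) (h : ¬ n > b) :
    ex17icnt n b hb = 0 := by
  rw [ex17icnt]; simp [h]

theorem ex17ocnt_pos (n a : Int) (h : n > a) :
    ex17ocnt n a = ex17ocnt n (a + 2) + 1 := by
  rw [ex17ocnt]; simp [h]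

theorem ex17ocnt_neg (n a : Int) (h : ¬ n > a) : ex17ocnt n a = 0 := by
  rw [ex17ocnt]; simp [h]

theorem ex17innerA_eq (n b : Int) (hb : 1 ≤ b) (arr : List Int) :
    ex17innerA n b hb arr = arr ++ List.replicate (ex17icnt n b hb) n := by
  fun_induction ex17innerA n b hb arr with
  | case1 b hb arr h ih =>
      rw [ih, ex17icnt_pos n b hb h]
      simp [List.replicate_succ]
  | case2 b hb arr h =>
      rw [ex17icnt_neg n b hb h]; simp

theorem ex17outerA_eq (n a : Int) (arr : List Int) :
    ex17outerA n a arr = arr ++ List.replicate (ex17ocnt n a * ex17icnt n 1 (by omega)) n := by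
  fun_induction ex17outerA n a arr with
  | case1 a arr h ih =>
      rw [ih, ex17innerA_eq, ex17ocnt_pos n a h]
      rw [List.append_assoc, ← List.replicate_add]
      ring_nf
  | case2 a arr h =>
      rw [ex17ocnt_neg n a h]; simp

theorem ex17ocnt_eq (n a : Int) : ex17ocnt n a = ((n - a).toNat + 1) / 2 := by
  fun_induction ex17ocnt n a with
  | case1 a h ih => rw [ih]; omega
  | case2 a h => omega

theorem ex17icnt_eq (n b : Int) (hb : 1 ≤ b) (hn : 1 ≤ n) :
    ex17icnt n b hb = PySem.Int.bitLength (PySem.Int.floordiv (n - 1) b) := by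
  fun_induction ex17icnt n b hb with
  | case1 b hb h ih =>
      rw [ih]
      have hq : 0 < PySem.Int.floordiv (n - 1) b := by
        rw [PySem.Int.floordiv_eq_ediv_of_pos (by omega)]
        apply Int.le_ediv_iff_mul_le (by omega) |>.mpr
        omega
      rw [PySem.Int.bitLength_of_pos hq]
      congr 1
      rw [PySem.Int.floordiv_eq_ediv_of_pos (show (0:Int) < b by omega),
          PySem.Int.floordiv_eq_ediv_of_pos (show (0:Int) < b * 2 by omega),
          PySem.Int.floordiv_eq_ediv_of_pos (show (0:Int) < 2 by omega)]
      rw [Int.ediv_ediv_of_nonneg]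
      omega
  | case2 b hb h =>
      have : PySem.Int.floordiv (n - 1) b = 0 := by
        rw [PySem.Int.floordiv_eq_ediv_of_pos (by omega)]
        apply Int.ediv_eq_zero_of_lt <;> omega
      rw [this]; simp

theorem ex17_main (n : Int) : exercise_17 n = exercise_17_alt n := by
  unfold exercise_17 exercise_17_alt
  rw [ex17outerA_eq]
  by_cases hn : n ≤ 1
  · rw [if_pos hn]
    have hz : ex17ocnt n 0 * ex17icnt n 1 (by omega) = 0 := by
      by_cases h0 : n ≤ 0
      · rw [ex17ocnt_neg n 0 (by omega)]; ring
      · rw [ex17icnt_neg n 1 (by omega) (by omega)]; ring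
    rw [hz]; simp
  · rw [if_neg hn]
    rw [ex17ocnt_eq, ex17icnt_eq n 1 (by omega) (by omega)]
    have h1 : PySem.Int.floordiv (n - 1) 1 = n - 1 := by
      rw [PySem.Int.floordiv_eq_ediv_of_pos (by omega)]; omega
    have h2 : PySem.Int.floordiv (n + 1) 2 = (((n.toNat + 1) / 2 : Nat) : Int) := by
      rw [PySem.Int.floordiv_eq_ediv_of_pos (by omega)]; omega
    rw [h1, h2]
    show _ = List.replicate _ n
    simp only [List.nil_append, sub_zero, ← Nat.cast_mul, Int.toNat_natCast]

-- ===== VERDICT (by name: the statement is the Claim_ definition above) =====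
theorem exercise_17_spec : Claim_equal_exercise_17 := by
  intro n _
  exact ex17_main n
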